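-- pv_equiv track=rewrite | github.com/siwaveliu/PLC_SYSTEM_TEST | lib/concentrator.py | calc_gdw1376p2_dt
-- ===== SOURCE A (Python) =====
-- def calc_gdw1376p2_dt(dt1, dt2):
--     dt = dt2 * 8
--     for i in range(8):
--         if (0 != (dt1 & 1)):
--             dt += i + 1
--             break
--         dt1 >>= 1
--
--     return dt
-- ===== SOURCE B (Python) =====
-- def calc_gdw1376p2_dt(dt1, dt2):
--     low = dt1 % 256
--     return dt2 * 8 + (low & -low).bit_length()
-- ===== Notes on version B (the rewrite author's own statement) =====
-- stated objective: simpler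
-- what changed: Replaced the 8-iteration scan-and-break over the low bits with a closed-form lowest-set-bit expression: low = dt1 % 256 and dt2*8 + (low & -low).bit_length().
import Mathlib
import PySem

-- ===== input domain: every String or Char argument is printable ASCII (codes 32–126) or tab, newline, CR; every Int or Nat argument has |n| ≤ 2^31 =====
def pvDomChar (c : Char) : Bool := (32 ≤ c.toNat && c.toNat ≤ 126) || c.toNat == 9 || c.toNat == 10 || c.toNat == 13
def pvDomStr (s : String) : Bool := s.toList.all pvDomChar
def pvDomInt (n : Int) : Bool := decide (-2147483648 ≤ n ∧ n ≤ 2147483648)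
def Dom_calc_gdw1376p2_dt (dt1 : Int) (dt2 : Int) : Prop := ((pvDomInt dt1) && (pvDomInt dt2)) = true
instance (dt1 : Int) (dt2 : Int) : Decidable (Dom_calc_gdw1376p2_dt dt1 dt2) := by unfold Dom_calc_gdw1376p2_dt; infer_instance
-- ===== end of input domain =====

-- B replaces A's 8-step scan-and-break over the low bits with a closed-form
-- lowest-set-bit expression ((low & -low).bit_length()); objective: simpler.

-- ===== PORT A =====
-- the for-loop with break: state (dt1, dt); on break, add i+1 and stop
def pvLoopA : List Int → Int → Int → Int
  | [], _, dt => dt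
  | i :: rest, dt1, dt =>
      if PySem.Int.band dt1 1 ≠ 0 then dt + (i + 1)
      else pvLoopA rest (dt1 >>> (1 : Nat)) dt

def calc_gdw1376p2_dt (dt1 : Int) (dt2 : Int) : Int :=
  pvLoopA (PySem.List.pyRange 0 8 1) dt1 (dt2 * 8)

-- ===== PORT B =====
def calc_gdw1376p2_dt_alt (dt1 : Int) (dt2 : Int) : Int :=
  let low := PySem.Int.mod dt1 256
  dt2 * 8 + (PySem.Int.bitLength (PySem.Int.band low (-low)) : Int)

-- ===== PRECONDITION & SPEC =====
def Spec_calc_gdw1376p2_dt (dt1 : Int) (dt2 : Int) (out : Int) : Prop := out = calc_gdw1376p2_dt_alt dt1 dt2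
instance (dt1 : Int) (dt2 : Int) (out : Int) : Decidable (Spec_calc_gdw1376p2_dt dt1 dt2 out) := by unfold Spec_calc_gdw1376p2_dt; infer_instance

-- ===== CLAIM (what is proved, stated in full; the proofs are below) =====
def Claim_equal_calc_gdw1376p2_dt : Prop := ∀ (dt1 : Int) (dt2 : Int), Dom_calc_gdw1376p2_dt dt1 dt2 → Spec_calc_gdw1376p2_dt dt1 dt2 (calc_gdw1376p2_dt dt1 dt2)

-- ===== LEMMAS AND PROOFS =====

-- core's `>>> 1` on Int is floor division by 2 (how Python shifts)
theorem pvShift1 (a : Int) : a >>> (1:Nat) = a / 2 := by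
  cases a with
  | ofNat m =>
    show Int.ofNat (m >>> 1) = Int.ofNat m / 2
    simp [Nat.shiftRight_eq_div_pow]
  | negSucc m =>
    show Int.negSucc (m >>> 1) = Int.negSucc m / 2
    simp [Nat.shiftRight_eq_div_pow]
    omega

-- the accumulator only receives additions: split it off
theorem pvLoopA_add (l : List Int) (a dt : Int) :
    pvLoopA l a dt = dt + pvLoopA l a 0 := by
  induction l generalizing a dt with
  | nil => simp [pvLoopA]
  | cons i rest ih =>
    simp only [pvLoopA]
    split_ifs with h
    · ring
    · exact ih (a >>> (1:Nat)) dt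

-- the loop on 256*q + r equals B's closed form on r, for 0 ≤ r < 256
theorem pvKey (q r : Int) (h0 : 0 ≤ r) (h1 : r < 256) :
    pvLoopA (PySem.List.pyRange 0 8 1) (256 * q + r) 0
      = (PySem.Int.bitLength (PySem.Int.band r (-r)) : Int) := by
  rw [show PySem.List.pyRange 0 8 1 = [0,1,2,3,4,5,6,7] from by decide]
  simp only [pvLoopA, pvShift1, PySem.Int.band_one,
    PySem.Int.mod_eq_emod_of_pos (by norm_num : (0:Int) < 2)]
  rw [show (256*q+r) % 2 = r % 2 from by omega,
      show (256*q+r)/2 % 2 = r/2 % 2 from by omega,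
      show (256*q+r)/2/2 % 2 = r/2/2 % 2 from by omega,
      show (256*q+r)/2/2/2 % 2 = r/2/2/2 % 2 from by omega,
      show (256*q+r)/2/2/2/2 % 2 = r/2/2/2/2 % 2 from by omega,
      show (256*q+r)/2/2/2/2/2 % 2 = r/2/2/2/2/2 % 2 from by omega,
      show (256*q+r)/2/2/2/2/2/2 % 2 = r/2/2/2/2/2/2 % 2 from by omega,
      show (256*q+r)/2/2/2/2/2/2/2 % 2 = r/2/2/2/2/2/2/2 % 2 from by omega]
  interval_cases r <;> decide

-- ===== VERDICT (by name: the statement is the Claim_ definition above) =====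
theorem calc_gdw1376p2_dt_spec : Claim_equal_calc_gdw1376p2_dt := by
  intro dt1 dt2 _
  show calc_gdw1376p2_dt dt1 dt2 = calc_gdw1376p2_dt_alt dt1 dt2
  unfold calc_gdw1376p2_dt calc_gdw1376p2_dt_alt
  rw [pvLoopA_add]
  rw [PySem.Int.mod_eq_emod_of_pos (by norm_num : (0:Int) < 256)]
  have h0 : 0 ≤ dt1 % 256 := Int.emod_nonneg _ (by norm_num)
  have h1 : dt1 % 256 < 256 := Int.emod_lt_of_pos _ (by norm_num)
  have hd : dt1 = 256 * (dt1 / 256) + dt1 % 256 := by omega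
  rw [show pvLoopA (PySem.List.pyRange 0 8 1) dt1 0
        = pvLoopA (PySem.List.pyRange 0 8 1) (256 * (dt1 / 256) + dt1 % 256) 0 from by rw [← hd]]
  rw [pvKey _ _ h0 h1]
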